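-- pv_equiv track=rewrite | github.com/YuWan886/GSkard-datapack | script/spawn_marker_1.py | gen_pattern1
-- ===== SOURCE A (Python) =====
-- def gen_pattern1(center_coord):
--     # 支持不同中心点，所有点相对中心点(-13, y, 33)的偏移与1.mcfunction一致
--     cx, y0, cz = center_coord
--
--     # 偏移量定义（以-13, y, 33为中心点）
--     # 红队
--     r_dw_offset = (-12, 2)
--     r_ttdw_offset = (14, 2)
--     r_tuteng_offset = (16, 14)
--     r_coords_offset = [
--         (-9, 5),   # 1b
--         (0, 5),    # 2b
--         (9, 5),    # 3b
--         (0, 9),    # 4b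
--         (-9, 14),  # 5b
--         (-5, 14),  # 6b
--         (0, 14),   # 7b
--         (5, 14),   # 8b
--         (9, 14),   # 9b
--         (0, 19),   # 10b
--         (-9, 23),  # 11b
--         (0, 23),   # 12b
--         (9, 23),   # 13b
--     ]
--     # 蓝队
--     b_dw_offset = (-12, -26)
--     b_ttdw_offset = (14, -26)
--     b_tuteng_offset = (16, -14)
--     b_coords_offset = [
--         (9, -5),    # 1r
--         (0, -5),    # 2r
--         (-9, -5),   # 3r
--         (0, -9),    # 4r
--         (9, -14),   # 5r
--         (5, -14),   # 6r
--         (0, -14),   # 7r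
--         (-5, -14),  # 8r
--         (-9, -14),  # 9r
--         (0, -19),   # 10r
--         (9, -23),   # 11r
--         (0, -23),   # 12r
--         (-9, -23),  # 13r
--     ]
--
--     # 红队
--     r_dw = (cx + r_dw_offset[0], y0, cz + r_dw_offset[1])
--     r_ttdw = (cx + r_ttdw_offset[0], y0, cz + r_ttdw_offset[1])
--     r_tuteng = (cx + r_tuteng_offset[0], y0, cz + r_tuteng_offset[1])
--     r_coords = [(cx + dx, y0, cz + dz) for dx, dz in r_coords_offset]
--
--     # 蓝队
--     b_dw = (cx + b_dw_offset[0], y0, cz + b_dw_offset[1])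
--     b_ttdw = (cx + b_ttdw_offset[0], y0, cz + b_ttdw_offset[1])
--     b_tuteng = (cx + b_tuteng_offset[0], y0, cz + b_tuteng_offset[1])
--     b_coords = [(cx + dx, y0, cz + dz) for dx, dz in b_coords_offset]
--
--     lines = []
--     # 蓝队
--     lines.append(f'execute if score b_dw p matches 0 run summon minecraft:marker {b_dw[0]} {b_dw[1]} {b_dw[2]} {{Tags:["b_dw"]}}')
--     lines.append(f'execute if score b_ttdw p matches 0 run summon minecraft:marker {b_ttdw[0]} {b_ttdw[1]} {b_ttdw[2]} {{Tags:["b_ttdw"]}}')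
--     lines.append(f'execute if score b_tuteng p matches 0 run summon minecraft:marker {b_tuteng[0]} {b_tuteng[1]} {b_tuteng[2]} {{Tags:["b_tuteng"]}}')
--     for idx, (x, y, z) in enumerate(b_coords, 1):
--         lines.append(f'execute if score {idx}r p matches 0 run summon minecraft:marker {x} {y} {z} {{Tags:["{idx}r"]}}')
--     # 红队
--     lines.append(f'execute if score r_dw p matches 0 run summon minecraft:marker {r_dw[0]} {r_dw[1]} {r_dw[2]} {{Tags:["r_dw"]}}')
--     lines.append(f'execute if score r_ttdw p matches 0 run summon minecraft:marker {r_ttdw[0]} {r_ttdw[1]} {r_ttdw[2]} {{Tags:["r_ttdw"]}}')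
--     lines.append(f'execute if score r_tuteng p matches 0 run summon minecraft:marker {r_tuteng[0]} {r_tuteng[1]} {r_tuteng[2]} {{Tags:["r_tuteng"]}}')
--     for idx, (x, y, z) in enumerate(r_coords, 1):
--         lines.append(f'execute if score {idx}b p matches 0 run summon minecraft:marker {x} {y} {z} {{Tags:["{idx}b"]}}')
--     return "\n".join(lines)
-- ===== SOURCE B (Python) =====
-- def gen_pattern1(center_coord):
--     cx, y0, cz = center_coord
--     markers = [("b_dw", -12, -26), ("b_ttdw", 14, -26), ("b_tuteng", 16, -14)]
--     markers += [(f"{i}r", dx, dz) for i, (dx, dz) in enumerate([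
--         (9, -5), (0, -5), (-9, -5), (0, -9), (9, -14), (5, -14), (0, -14),
--         (-5, -14), (-9, -14), (0, -19), (9, -23), (0, -23), (-9, -23)], 1)]
--     markers += [("r_dw", -12, 2), ("r_ttdw", 14, 2), ("r_tuteng", 16, 14)]
--     markers += [(f"{i}b", dx, dz) for i, (dx, dz) in enumerate([
--         (-9, 5), (0, 5), (9, 5), (0, 9), (-9, 14), (-5, 14), (0, 14),
--         (5, 14), (9, 14), (0, 19), (-9, 23), (0, 23), (9, 23)], 1)]
--     return "\n".join(
--         f'execute if score {tag} p matches 0 run summon minecraft:marker '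
--         f'{cx + dx} {y0} {cz + dz} {{Tags:["{tag}"]}}'
--         for tag, dx, dz in markers)
-- ===== Notes on version B (the rewrite author's own statement) =====
-- stated objective: simpler
-- what changed: Replaced A's six unrolled per-marker appends and two separate enumerate loops with one ordered (tag, dx, dz) marker table traversed by a single data-driven pass that formats every line with one shared template.
import Mathlib
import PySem

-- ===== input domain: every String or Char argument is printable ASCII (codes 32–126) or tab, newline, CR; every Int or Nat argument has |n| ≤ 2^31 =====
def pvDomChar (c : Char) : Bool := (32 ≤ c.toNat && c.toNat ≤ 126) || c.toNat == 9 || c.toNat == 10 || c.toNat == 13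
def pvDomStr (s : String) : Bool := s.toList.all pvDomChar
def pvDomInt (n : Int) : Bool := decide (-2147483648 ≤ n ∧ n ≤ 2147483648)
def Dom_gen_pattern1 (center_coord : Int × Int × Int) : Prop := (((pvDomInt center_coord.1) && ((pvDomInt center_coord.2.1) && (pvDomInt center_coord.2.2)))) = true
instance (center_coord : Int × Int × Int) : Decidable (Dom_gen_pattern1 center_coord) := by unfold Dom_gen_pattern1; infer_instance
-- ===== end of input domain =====

-- B replaces A's unrolled per-marker appends and two enumerate loops by one data-driven
-- pass over a single (tag, dx, dz) table (objective: simpler).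

-- ===== PORT A =====
def gen_pattern1 (center_coord : Int × Int × Int) : String :=
  let cx := center_coord.1
  let y0 := center_coord.2.1
  let cz := center_coord.2.2
  let r_dw_offset : Int × Int := (-12, 2)
  let r_ttdw_offset : Int × Int := (14, 2)
  let r_tuteng_offset : Int × Int := (16, 14)
  let r_coords_offset : List (Int × Int) :=
    [(-9, 5), (0, 5), (9, 5), (0, 9), (-9, 14), (-5, 14), (0, 14),
     (5, 14), (9, 14), (0, 19), (-9, 23), (0, 23), (9, 23)]
  let b_dw_offset : Int × Int := (-12, -26)
  let b_ttdw_offset : Int × Int := (14, -26)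
  let b_tuteng_offset : Int × Int := (16, -14)
  let b_coords_offset : List (Int × Int) :=
    [(9, -5), (0, -5), (-9, -5), (0, -9), (9, -14), (5, -14), (0, -14),
     (-5, -14), (-9, -14), (0, -19), (9, -23), (0, -23), (-9, -23)]
  let r_dw : Int × Int × Int := (cx + r_dw_offset.1, y0, cz + r_dw_offset.2)
  let r_ttdw : Int × Int × Int := (cx + r_ttdw_offset.1, y0, cz + r_ttdw_offset.2)
  let r_tuteng : Int × Int × Int := (cx + r_tuteng_offset.1, y0, cz + r_tuteng_offset.2)
  let r_coords : List (Int × Int × Int) := r_coords_offset.map (fun p => (cx + p.1, y0, cz + p.2))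
  let b_dw : Int × Int × Int := (cx + b_dw_offset.1, y0, cz + b_dw_offset.2)
  let b_ttdw : Int × Int × Int := (cx + b_ttdw_offset.1, y0, cz + b_ttdw_offset.2)
  let b_tuteng : Int × Int × Int := (cx + b_tuteng_offset.1, y0, cz + b_tuteng_offset.2)
  let b_coords : List (Int × Int × Int) := b_coords_offset.map (fun p => (cx + p.1, y0, cz + p.2))
  let lines : List String := []
  let lines := lines ++ ["execute if score b_dw p matches 0 run summon minecraft:marker " ++ PySem.Int.toStr b_dw.1 ++ " " ++ PySem.Int.toStr b_dw.2.1 ++ " " ++ PySem.Int.toStr b_dw.2.2 ++ " {Tags:[\"b_dw\"]}"]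
  let lines := lines ++ ["execute if score b_ttdw p matches 0 run summon minecraft:marker " ++ PySem.Int.toStr b_ttdw.1 ++ " " ++ PySem.Int.toStr b_ttdw.2.1 ++ " " ++ PySem.Int.toStr b_ttdw.2.2 ++ " {Tags:[\"b_ttdw\"]}"]
  let lines := lines ++ ["execute if score b_tuteng p matches 0 run summon minecraft:marker " ++ PySem.Int.toStr b_tuteng.1 ++ " " ++ PySem.Int.toStr b_tuteng.2.1 ++ " " ++ PySem.Int.toStr b_tuteng.2.2 ++ " {Tags:[\"b_tuteng\"]}"]
  let lines := (PySem.List.enumerate b_coords 1).foldl (fun acc p =>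
    acc ++ ["execute if score " ++ PySem.Int.toStr p.1 ++ "r p matches 0 run summon minecraft:marker " ++ PySem.Int.toStr p.2.1 ++ " " ++ PySem.Int.toStr p.2.2.1 ++ " " ++ PySem.Int.toStr p.2.2.2 ++ " {Tags:[\"" ++ PySem.Int.toStr p.1 ++ "r\"]}"]) lines
  let lines := lines ++ ["execute if score r_dw p matches 0 run summon minecraft:marker " ++ PySem.Int.toStr r_dw.1 ++ " " ++ PySem.Int.toStr r_dw.2.1 ++ " " ++ PySem.Int.toStr r_dw.2.2 ++ " {Tags:[\"r_dw\"]}"]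
  let lines := lines ++ ["execute if score r_ttdw p matches 0 run summon minecraft:marker " ++ PySem.Int.toStr r_ttdw.1 ++ " " ++ PySem.Int.toStr r_ttdw.2.1 ++ " " ++ PySem.Int.toStr r_ttdw.2.2 ++ " {Tags:[\"r_ttdw\"]}"]
  let lines := lines ++ ["execute if score r_tuteng p matches 0 run summon minecraft:marker " ++ PySem.Int.toStr r_tuteng.1 ++ " " ++ PySem.Int.toStr r_tuteng.2.1 ++ " " ++ PySem.Int.toStr r_tuteng.2.2 ++ " {Tags:[\"r_tuteng\"]}"]
  let lines := (PySem.List.enumerate r_coords 1).foldl (fun acc p =>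
    acc ++ ["execute if score " ++ PySem.Int.toStr p.1 ++ "b p matches 0 run summon minecraft:marker " ++ PySem.Int.toStr p.2.1 ++ " " ++ PySem.Int.toStr p.2.2.1 ++ " " ++ PySem.Int.toStr p.2.2.2 ++ " {Tags:[\"" ++ PySem.Int.toStr p.1 ++ "b\"]}"]) lines
  PySem.Str.join "\n" lines

-- ===== PORT B =====
def gen_pattern1_alt (center_coord : Int × Int × Int) : String :=
  let cx := center_coord.1
  let y0 := center_coord.2.1
  let cz := center_coord.2.2
  let markers : List (String × Int × Int) :=
    [("b_dw", -12, -26), ("b_ttdw", 14, -26), ("b_tuteng", 16, -14)]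
    ++ (PySem.List.enumerate ([(9, -5), (0, -5), (-9, -5), (0, -9), (9, -14), (5, -14), (0, -14),
          (-5, -14), (-9, -14), (0, -19), (9, -23), (0, -23), (-9, -23)] : List (Int × Int))
          1).map (fun p => (PySem.Int.toStr p.1 ++ "r", p.2.1, p.2.2))
    ++ [("r_dw", -12, 2), ("r_ttdw", 14, 2), ("r_tuteng", 16, 14)]
    ++ (PySem.List.enumerate ([(-9, 5), (0, 5), (9, 5), (0, 9), (-9, 14), (-5, 14), (0, 14),
          (5, 14), (9, 14), (0, 19), (-9, 23), (0, 23), (9, 23)] : List (Int × Int))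
          1).map (fun p => (PySem.Int.toStr p.1 ++ "b", p.2.1, p.2.2))
  PySem.Str.join "\n" (markers.map (fun m =>
    "execute if score " ++ m.1 ++ " p matches 0 run summon minecraft:marker "
      ++ PySem.Int.toStr (cx + m.2.1) ++ " " ++ PySem.Int.toStr y0 ++ " "
      ++ PySem.Int.toStr (cz + m.2.2) ++ " {Tags:[\"" ++ m.1 ++ "\"]}"))

-- ===== PRECONDITION & SPEC =====
def Spec_gen_pattern1 (center_coord : Int × Int × Int) (out : String) : Prop := out = gen_pattern1_alt center_coord
instance (center_coord : Int × Int × Int) (out : String) : Decidable (Spec_gen_pattern1 center_coord out) := by unfold Spec_gen_pattern1; infer_instance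

-- ===== CLAIM (what is proved, stated in full; the proofs are below) =====
def Claim_equal_gen_pattern1 : Prop := ∀ (center_coord : Int × Int × Int), Dom_gen_pattern1 center_coord → Spec_gen_pattern1 center_coord (gen_pattern1 center_coord)

-- ===== LEMMAS AND PROOFS =====

-- ===== VERDICT (by name: the statement is the Claim_ definition above) =====
set_option maxHeartbeats 2000000 in
theorem gen_pattern1_spec : Claim_equal_gen_pattern1 := by
  intro c _
  unfold Spec_gen_pattern1 gen_pattern1 gen_pattern1_alt
  simp only [PySem.List.enumerate_cons, PySem.List.enumerate_nil,
    List.foldl_cons, List.foldl_nil, List.map_cons, List.map_nil,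
    List.cons_append, List.nil_append, List.append_assoc]
  simp [String.append_assoc]
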